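-- pv_equiv track=rewrite | github.com/pypi-data/pypi-mirror-392 | packages/reticulum/reticulum-0.6.9.tar.gz/reticulum-0.6.9/src/reticulum/security_scanner.py | _extract_docker_version
-- ===== SOURCE A (Python) =====
-- def _extract_docker_version(version_output: str) -> str:
--     """Extract Docker version from version command output."""
--     try:
--         for line in version_output.split("\n"):
--             if "Version:" in line:
--                 return line.split("Version:")[1].strip()
--         return "unknown"
--     except Exception:
--         return "unknown"
-- ===== SOURCE B (Python) =====
-- def _extract_docker_version(version_output: str) -> str:
--     """Extract Docker version from version command output."""
--     parts = version_output.split("Version:")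
--     if len(parts) < 2:
--         return "unknown"
--     return parts[1].split("\n")[0].strip()
-- ===== Notes on version B (the rewrite author's own statement) =====
-- stated objective: simpler
-- what changed: B splits the whole output once on the version marker and trims the first segment after it at the next newline, instead of A's line-by-line loop that re-searches and re-splits each line; no try/except is needed.
import Mathlib
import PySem

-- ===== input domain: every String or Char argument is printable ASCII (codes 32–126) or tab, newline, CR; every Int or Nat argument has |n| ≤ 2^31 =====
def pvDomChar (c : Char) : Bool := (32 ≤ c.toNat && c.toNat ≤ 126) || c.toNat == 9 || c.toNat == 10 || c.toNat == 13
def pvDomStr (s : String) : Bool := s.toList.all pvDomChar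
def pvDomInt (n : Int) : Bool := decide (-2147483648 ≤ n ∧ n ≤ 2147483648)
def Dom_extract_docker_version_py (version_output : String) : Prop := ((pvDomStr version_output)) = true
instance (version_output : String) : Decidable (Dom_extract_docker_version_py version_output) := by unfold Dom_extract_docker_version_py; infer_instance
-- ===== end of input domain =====

-- B replaces A's line-by-line loop by one split on the marker "Version:" (simpler; same return value).

-- ===== PORT A =====
-- the 'for line in version_output.split("\n")' loop with its early return
def extractA_go : List (List Char) → List Char
  | [] => "unknown".toList                          -- loop fell through: return "unknown"
  | l :: ls =>
    if PySem.Chars.isIn "Version:".toList l then    -- if "Version:" in line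
      match PySem.List.pyGet? (PySem.Chars.splitOn l "Version:".toList) 1 with
      | some t => PySem.Chars.strip t               -- return line.split("Version:")[1].strip()
      | none => "unknown".toList                    -- except Exception: (unreachable: the marker is in l)
    else extractA_go ls

def extract_docker_version_py (version_output : String) : String :=
  String.ofList (extractA_go (PySem.Chars.splitOn version_output.toList "\n".toList))

-- ===== PORT B =====
def extract_docker_version_py_alt (version_output : String) : String :=
  match PySem.Chars.splitOn version_output.toList "Version:".toList with
  | _ :: p1 :: _ =>        -- len(parts) >= 2, p1 = parts[1]
    -- parts[1].split("\n")[0].strip(); split never returns an empty list, so [0] is headD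
    String.ofList (PySem.Chars.strip ((PySem.Chars.splitOn p1 "\n".toList).headD []))
  | _ => "unknown"

-- ===== PRECONDITION & SPEC =====
def Spec_extract_docker_version_py (version_output : String) (out : String) : Prop := out = extract_docker_version_py_alt version_output
instance (version_output : String) (out : String) : Decidable (Spec_extract_docker_version_py version_output out) := by unfold Spec_extract_docker_version_py; infer_instance

-- ===== CLAIM (what is proved, stated in full; the proofs are below) =====
def Claim_equal_extract_docker_version_py : Prop := ∀ (version_output : String), Dom_extract_docker_version_py version_output → Spec_extract_docker_version_py version_output (extract_docker_version_py version_output)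

-- ===== LEMMAS AND PROOFS =====

-- Python split with a non-empty separator a :: tl, as a plain structural recursion
-- (proved equal to PySem.Chars.splitOn in splitOn_eq_spv below)
def spv (a : Char) (tl : List Char) : List Char → List (List Char)
  | [] => [[]]
  | c :: rest =>
    if (a :: tl).isPrefixOf (c :: rest) then [] :: spv a tl (rest.drop tl.length)
    else (spv a tl rest).modifyHead (c :: ·)
termination_by l => l.length
decreasing_by all_goals (simp; try omega)

theorem spv_nil (a : Char) (tl : List Char) : spv a tl [] = [[]] := by rw [spv]

theorem spv_cons (a : Char) (tl : List Char) (c : Char) (rest : List Char) :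
    spv a tl (c :: rest)
      = if (a :: tl).isPrefixOf (c :: rest) then [] :: spv a tl (rest.drop tl.length)
        else (spv a tl rest).modifyHead (c :: ·) := by rw [spv]

theorem spv_ne_nil (a : Char) (tl : List Char) (l : List Char) : spv a tl l ≠ [] := by
  induction l using spv.induct a tl with
  | case1 => simp [spv_nil]
  | case2 c rest hp ih => simp [spv_cons, hp]
  | case3 c rest hp ih =>
    rw [spv_cons, if_neg hp]
    cases hr : spv a tl rest with
    | nil => exact absurd hr ih
    | cons x xs => simp

theorem go_spec (a : Char) (tl : List Char) (fuel : Nat) (l cur : List Char)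
    (acc : List (List Char)) (hf : l.length < fuel) :
    PySem.Chars.splitOn.go (a :: tl) fuel l cur acc
      = acc.reverse ++ (spv a tl l).modifyHead (cur.reverse ++ ·) := by
  induction fuel generalizing l cur acc with
  | zero => omega
  | succ n ih =>
    cases l with
    | nil => simp [PySem.Chars.splitOn.go, spv_nil]
    | cons c rest =>
      rw [PySem.Chars.splitOn.go]
      by_cases hp : (a :: tl).isPrefixOf (c :: rest) = true
      · rw [if_pos hp]
        rw [ih _ _ _ (by simp at hf ⊢; omega)]
        rw [spv_cons, if_pos hp]
        cases h2 : spv a tl (rest.drop tl.length) with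
        | nil => exact absurd h2 (spv_ne_nil a tl _)
        | cons x xs => simp [h2]
      · rw [if_neg hp]
        rw [ih _ _ _ (by simp at hf ⊢; omega)]
        rw [spv_cons, if_neg hp]
        cases h2 : spv a tl rest with
        | nil => exact absurd h2 (spv_ne_nil a tl rest)
        | cons x xs => simp

theorem splitOn_eq_spv (a : Char) (tl : List Char) (l : List Char) :
    PySem.Chars.splitOn l (a :: tl) = spv a tl l := by
  unfold PySem.Chars.splitOn
  rw [go_spec a tl _ l [] [] (by omega)]
  cases h2 : spv a tl l with
  | nil => exact absurd h2 (spv_ne_nil a tl l)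
  | cons x xs => simp

theorem spv_head_prefix (a : Char) (tl : List Char) (l : List Char) :
    (spv a tl l).headD [] <+: l := by
  induction l using spv.induct a tl with
  | case1 => simp [spv_nil]
  | case2 c rest hp ih => simp [spv_cons, hp]
  | case3 c rest hp ih =>
    rw [spv_cons, if_neg hp]
    cases hr : spv a tl rest with
    | nil => exact absurd hr (spv_ne_nil a tl rest)
    | cons x xs =>
      simp only [List.modifyHead_cons, List.headD_cons]
      have : x <+: rest := by rw [hr] at ih; exact ih
      exact List.cons_prefix_cons.mpr ⟨rfl, this⟩

theorem spv_nl_append (p t : List Char) (h : ∀ c ∈ p, c ≠ '\n') :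
    spv '\n' [] (p ++ t) = (spv '\n' [] t).modifyHead (p ++ ·) := by
  induction p with
  | nil =>
    cases h2 : spv '\n' [] t with
    | nil => exact absurd h2 (spv_ne_nil _ _ t)
    | cons x xs => simp [h2]
  | cons c p ih =>
    have hc : c ≠ '\n' := h c (by simp)
    rw [List.cons_append, spv_cons, if_neg]
    · rw [ih (fun d hd => h d (by simp [hd]))]
      cases h2 : spv '\n' [] t with
      | nil => exact absurd h2 (spv_ne_nil _ _ t)
      | cons x xs => simp
    · simp [List.isPrefixOf_iff_prefix, List.cons_prefix_cons]
      intro h'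
      exact hc h'.symm

theorem spv_crux (d : List Char) :
    (spv 'V' "ersion:".toList ((spv '\n' [] d).headD [])).headD []
      = (spv '\n' [] ((spv 'V' "ersion:".toList d).headD [])).headD [] := by
  induction d with
  | nil => simp [spv_nil]
  | cons c rest ih =>
    by_cases hV : ('V' :: "ersion:".toList).isPrefixOf (c :: rest) = true
    · -- the marker starts here: both sides reduce to []
      obtain ⟨t, ht⟩ := List.isPrefixOf_iff_prefix.mp hV
      -- right side
      conv_rhs => rw [spv_cons, if_pos hV]
      simp only [List.headD_cons]
      rw [spv_nil]
      -- left side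
      rw [← ht, spv_nl_append _ t (by simp [show "ersion:".toList = ['e','r','s','i','o','n',':'] from rfl])]
      cases h2 : spv '\n' [] t with
      | nil => exact absurd h2 (spv_ne_nil _ _ t)
      | cons x xs =>
        simp only [List.modifyHead_cons, List.headD_cons]
        rw [List.cons_append, spv_cons, if_pos]
        · simp
        · exact List.isPrefixOf_iff_prefix.mpr ⟨x, by simp⟩
    · by_cases hc : c = '\n'
      · subst hc
        conv_lhs => rw [spv_cons, if_pos (by simp [List.isPrefixOf])]
        conv_rhs => rw [spv_cons, if_neg hV]
        cases h2 : spv 'V' "ersion:".toList rest with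
        | nil => exact absurd h2 (spv_ne_nil _ _ rest)
        | cons x xs =>
          simp only [List.modifyHead_cons, List.headD_cons]
          rw [spv_nil, spv_cons, if_pos (by simp [List.isPrefixOf])]
          simp
      · -- ordinary character: both sides push c and recurse
        conv_lhs => rw [spv_cons, if_neg (by simp [List.isPrefixOf]; intro h'; exact hc h'.symm)]
        conv_rhs => rw [spv_cons, if_neg hV]
        cases h1 : spv '\n' [] rest with
        | nil => exact absurd h1 (spv_ne_nil _ _ rest)
        | cons h1h h1t =>
          cases h2 : spv 'V' "ersion:".toList rest with
          | nil => exact absurd h2 (spv_ne_nil _ _ rest)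
          | cons h2h h2t =>
            simp only [List.modifyHead_cons, List.headD_cons]
            -- "Version:" is not a prefix of c :: h1h (else it would be a prefix of c :: rest)
            have hnp : ¬ (('V' :: "ersion:".toList).isPrefixOf (c :: h1h) = true) := by
              intro hp
              apply hV
              rw [List.isPrefixOf_iff_prefix] at hp ⊢
              have hpre : h1h <+: rest := by
                have := spv_head_prefix '\n' [] rest; rwa [h1] at this
              exact hp.trans (List.cons_prefix_cons.mpr ⟨rfl, hpre⟩)
            rw [spv_cons, if_neg hnp]
            cases h3 : spv 'V' "ersion:".toList h1h with
            | nil => exact absurd h3 (spv_ne_nil _ _ h1h)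
            | cons h3h h3t =>
              simp only [List.modifyHead_cons, List.headD_cons]
              rw [spv_cons, if_neg (by simp [List.isPrefixOf]; intro h'; exact hc h'.symm)]
              cases h4 : spv '\n' [] h2h with
              | nil => exact absurd h4 (spv_ne_nil _ _ h2h)
              | cons h4h h4t =>
                simp only [List.modifyHead_cons, List.headD_cons]
                rw [h1, h2] at ih
                simp only [List.headD_cons, h3, h4, List.headD_cons] at ih
                rw [ih]

theorem isIn_nil_false : PySem.Chars.isIn "Version:".toList [] = false := by
  rw [PySem.Chars.isIn_eq_false_iff]
  simp [show "Version:".toList = 'V' :: "ersion:".toList from rfl]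

theorem pyGet1_cons_cons (x u : List Char) (us : List (List Char)) :
    PySem.List.pyGet? (x :: u :: us) 1 = some u := by
  simp [PySem.List.pyGet?, PySem.List.pyIdx?]

theorem pyGet1_irrel (x y : List Char) (us : List (List Char)) :
    PySem.List.pyGet? (x :: us) 1 = PySem.List.pyGet? (y :: us) 1 := by
  cases us <;> simp [PySem.List.pyGet?, PySem.List.pyIdx?]

theorem spv_main (cs : List Char) :
    extractA_go (spv '\n' [] cs)
      = (match spv 'V' "ersion:".toList cs with
         | _ :: p1 :: _ => PySem.Chars.strip ((spv '\n' [] p1).headD [])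
         | _ => "unknown".toList) := by
  have hVr : "Version:".toList = 'V' :: "ersion:".toList := rfl
  induction cs with
  | nil =>
    rw [spv_nil, spv_nil]
    simp only [extractA_go, isIn_nil_false, Bool.false_eq_true, if_false]
  | cons c rest ih =>
    by_cases hV : ('V' :: "ersion:".toList).isPrefixOf (c :: rest) = true
    · -- the marker starts right here
      obtain ⟨t, ht⟩ := List.isPrefixOf_iff_prefix.mp hV
      rw [List.cons_append] at ht
      injection ht with hc hrest
      subst hc; subst hrest
      -- right side
      conv_rhs => rw [spv_cons, if_pos (List.isPrefixOf_iff_prefix.mpr ⟨t, by simp⟩)]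
      rw [List.drop_left]
      -- left side
      rw [show ('V' : Char) :: ("ersion:".toList ++ t) = ('V' :: "ersion:".toList) ++ t from rfl,
          spv_nl_append _ t (by simp [show "ersion:".toList = ['e','r','s','i','o','n',':'] from rfl])]
      cases h1 : spv '\n' [] t with
      | nil => exact absurd h1 (spv_ne_nil _ _ t)
      | cons x xs =>
        simp only [List.modifyHead_cons]
        have hin : PySem.Chars.isIn "Version:".toList (('V' :: "ersion:".toList) ++ x) = true := by
          rw [PySem.Chars.isIn_iff_infix, hVr]
          exact (List.prefix_append _ x).isInfix
        simp only [extractA_go, hin, if_true]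
        rw [hVr, splitOn_eq_spv,
            show ('V' :: "ersion:".toList) ++ x = 'V' :: ("ersion:".toList ++ x) from rfl,
            spv_cons, if_pos (List.isPrefixOf_iff_prefix.mpr ⟨x, by simp⟩), List.drop_left]
        cases h3 : spv 'V' "ersion:".toList x with
        | nil => exact absurd h3 (spv_ne_nil _ _ x)
        | cons q qs =>
          rw [pyGet1_cons_cons]
          cases h2 : spv 'V' "ersion:".toList t with
          | nil => exact absurd h2 (spv_ne_nil _ _ t)
          | cons r rs =>
            simp only []
            have hcx := spv_crux t
            rw [h1, h2] at hcx
            simp only [List.headD_cons] at hcx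
            rw [h3] at hcx
            simp only [List.headD_cons] at hcx
            rw [hcx]
    · -- the marker does not start here: both sides step to `rest`
      have hRHS : (match spv 'V' "ersion:".toList (c :: rest) with
           | _ :: p1 :: _ => PySem.Chars.strip ((spv '\n' [] p1).headD [])
           | _ => "unknown".toList)
          = (match spv 'V' "ersion:".toList rest with
           | _ :: p1 :: _ => PySem.Chars.strip ((spv '\n' [] p1).headD [])
           | _ => "unknown".toList) := by
        rw [spv_cons, if_neg hV]
        cases h2 : spv 'V' "ersion:".toList rest with
        | nil => exact absurd h2 (spv_ne_nil _ _ rest)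
        | cons p0 ps => cases ps <;> simp
      rw [hRHS, ← ih]
      by_cases hc : c = '\n'
      · subst hc
        rw [spv_cons, if_pos (by simp [List.isPrefixOf]), List.length_nil, List.drop_zero]
        simp only [extractA_go, isIn_nil_false, Bool.false_eq_true, if_false]
      · rw [spv_cons, if_neg (by simp [List.isPrefixOf]; intro h'; exact hc h'.symm)]
        cases h1 : spv '\n' [] rest with
        | nil => exact absurd h1 (spv_ne_nil _ _ rest)
        | cons h0 t0 =>
          simp only [List.modifyHead_cons]
          have hpre : h0 <+: rest := by
            have := spv_head_prefix '\n' [] rest; rwa [h1, List.headD_cons] at this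
          have hnp : ¬ ('V' :: "ersion:".toList <+: c :: h0) := by
            intro hp
            exact hV (List.isPrefixOf_iff_prefix.mpr
              (hp.trans (List.cons_prefix_cons.mpr ⟨rfl, hpre⟩)))
          by_cases hin : PySem.Chars.isIn "Version:".toList (c :: h0) = true
          · have hinf := (PySem.Chars.isIn_iff_infix _ _).mp hin
            rw [hVr] at hinf
            have hinf0 : 'V' :: "ersion:".toList <:+: h0 := by
              rcases List.infix_cons_iff.mp hinf with hp | h
              · exact absurd hp hnp
              · exact h
            have hin0 : PySem.Chars.isIn "Version:".toList h0 = true := by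
              rw [PySem.Chars.isIn_iff_infix, hVr]; exact hinf0
            simp only [extractA_go, hin, hin0, if_true]
            rw [hVr, splitOn_eq_spv, splitOn_eq_spv, spv_cons,
                if_neg (fun hp => hnp (List.isPrefixOf_iff_prefix.mp hp))]
            cases h3 : spv 'V' "ersion:".toList h0 with
            | nil => exact absurd h3 (spv_ne_nil _ _ h0)
            | cons u us =>
              simp only [List.modifyHead_cons]
              rw [pyGet1_irrel (c :: u) u us]
          · have hin0 : PySem.Chars.isIn "Version:".toList h0 = false := by
              rw [PySem.Chars.isIn_eq_false_iff]
              intro hinf0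
              exact hin (((PySem.Chars.isIn_iff_infix _ _).mpr (List.infix_cons_iff.mpr (Or.inr hinf0))))
            simp only [extractA_go, hin, hin0]
            simp

-- ===== VERDICT (by name: the statement is the Claim_ definition above) =====
theorem extract_docker_version_py_spec : Claim_equal_extract_docker_version_py := by
  intro s _
  unfold Spec_extract_docker_version_py extract_docker_version_py extract_docker_version_py_alt
  have hNL : "\n".toList = ('\n' : Char) :: [] := rfl
  have hV : "Version:".toList = 'V' :: "ersion:".toList := rfl
  rw [hNL, hV, splitOn_eq_spv, splitOn_eq_spv, spv_main]
  cases h : spv 'V' "ersion:".toList s.toList with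
  | nil => exact absurd h (spv_ne_nil _ _ _)
  | cons p0 ps =>
    cases ps with
    | nil => simp
    | cons p1 ps' => simp [splitOn_eq_spv]
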